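-- pv_equiv track=rewrite | github.com/MostafaAbdelmegeed/brain_connectome | networks.py | create_functional_groups
-- ===== SOURCE A (Python) =====
-- def create_functional_groups(aal_to_yeo17_mapping):
--     # Yeo networks are labeled from 1 to 17
--     yeo_networks_17 = [
--         'Visual1', 'Visual2', 'Visual3',
--         'Somatomotor1', 'Somatomotor2',
--         'DorsalAttention1', 'DorsalAttention2',
--         'Salience1', 'Salience2',
--         'Limbic_TempPole', 'Limbic_OFC',
--         'Control1', 'Control2', 'Control3',
--         'Default1', 'Default2', 'Default3'
--     ]
--
--     # Initialize the functional groups dictionary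
--     functional_groups = {name: [] for name in yeo_networks_17}
--     functional_groups['other'] = []
--
--     # Map AAL ROIs to Yeo network names
--     for aal_index, yeo_label in aal_to_yeo17_mapping.items():
--         if yeo_label == 0:
--             functional_groups['other'].append(aal_index)
--         else:
--             network_name = yeo_networks_17[yeo_label - 1]
--             functional_groups[network_name].append(aal_index)
--
--     return functional_groups
-- ===== SOURCE B (Python) =====
-- def create_functional_groups(aal_to_yeo17_mapping):
--     yeo_networks_17 = [
--         'Visual1', 'Visual2', 'Visual3',
--         'Somatomotor1', 'Somatomotor2',
--         'DorsalAttention1', 'DorsalAttention2',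
--         'Salience1', 'Salience2',
--         'Limbic_TempPole', 'Limbic_OFC',
--         'Control1', 'Control2', 'Control3',
--         'Default1', 'Default2', 'Default3'
--     ]
--     items = list(aal_to_yeo17_mapping.items())
--     functional_groups = {
--         name: [idx for idx, label in items
--                if label != 0 and yeo_networks_17[label - 1] == name]
--         for name in yeo_networks_17
--     }
--     functional_groups['other'] = [idx for idx, label in items if label == 0]
--     return functional_groups
-- ===== Notes on version B (the rewrite author's own statement) =====
-- stated objective: alternative
-- what changed: Replaces the single accumulating loop that appends into a pre-initialized dict with a per-bucket decomposition: each of the 18 buckets is built by its own comprehension filtering the items list.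
import Mathlib
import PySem

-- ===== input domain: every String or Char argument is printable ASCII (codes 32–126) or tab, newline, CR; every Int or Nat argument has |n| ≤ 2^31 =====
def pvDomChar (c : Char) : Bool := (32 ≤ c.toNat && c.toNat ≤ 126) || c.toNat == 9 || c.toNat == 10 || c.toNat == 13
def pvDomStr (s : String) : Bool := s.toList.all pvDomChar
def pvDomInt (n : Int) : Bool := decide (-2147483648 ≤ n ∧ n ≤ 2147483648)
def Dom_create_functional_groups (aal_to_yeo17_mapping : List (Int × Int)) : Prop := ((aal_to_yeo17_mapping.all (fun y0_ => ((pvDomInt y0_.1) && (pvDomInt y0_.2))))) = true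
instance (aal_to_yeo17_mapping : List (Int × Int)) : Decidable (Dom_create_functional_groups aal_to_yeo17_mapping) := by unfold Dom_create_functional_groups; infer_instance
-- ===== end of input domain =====

-- B replaces A's single accumulating loop over the dict by one filtering pass per bucket
-- (same 18 buckets, same per-item yeo_networks_17[label-1] lookup); objective: alternative decomposition.

-- ===== PORT A =====
-- the yeo_networks_17 list literal shared by both Pythons
def yeoNames17 : List String :=
  ["Visual1", "Visual2", "Visual3",
   "Somatomotor1", "Somatomotor2",
   "DorsalAttention1", "DorsalAttention2",
   "Salience1", "Salience2",
   "Limbic_TempPole", "Limbic_OFC",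
   "Control1", "Control2", "Control3",
   "Default1", "Default2", "Default3"]

-- functional_groups[k].append(v) on the insertion-ordered dict (assoc list): update the first entry with key k
def dictAppendAt (d : List (String × List Int)) (k : String) (v : Int) : List (String × List Int) :=
  match d with
  | [] => []
  | (n, xs) :: rest => if n = k then (n, xs ++ [v]) :: rest else (n, xs) :: dictAppendAt rest k v

-- the body of A's 'for aal_index, yeo_label in …' loop: append aal_index to the right bucket
def stepA (d : List (String × List Int)) (p : Int × Int) : List (String × List Int) :=
  if p.2 = 0 then dictAppendAt d "other" p.1
  else
    match PySem.List.pyGet? yeoNames17 (p.2 - 1) with  -- yeo_networks_17[yeo_label - 1]; none = IndexError, excluded by Pre_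
    | some name => dictAppendAt d name p.1
    | none => d

def create_functional_groups (aal_to_yeo17_mapping : List (Int × Int)) : List (String × List Int) :=
  -- functional_groups = {name: [] for name in yeo_networks_17}; functional_groups['other'] = []
  let init := (yeoNames17.map (fun n => (n, ([] : List Int)))) ++ [("other", ([] : List Int))]
  aal_to_yeo17_mapping.foldl stepA init

-- ===== PORT B =====
def create_functional_groups_alt (aal_to_yeo17_mapping : List (Int × Int)) : List (String × List Int) :=
  (yeoNames17.map (fun name =>
     (name, (aal_to_yeo17_mapping.filter
               (fun p => p.2 != 0 && (PySem.List.pyGet? yeoNames17 (p.2 - 1) == some name))).map (·.1))))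
  ++ [("other", (aal_to_yeo17_mapping.filter (fun p => p.2 == 0)).map (·.1))]

-- ===== PRECONDITION & SPEC =====
-- Pre_ excludes exactly the inputs where A raises IndexError: a label with label-1 outside the
-- negative-wrap index range of the 17-name list, i.e. label < -16 or label > 17.
def Pre_create_functional_groups (aal_to_yeo17_mapping : List (Int × Int)) : Prop :=
  ∀ p ∈ aal_to_yeo17_mapping, -16 ≤ p.2 ∧ p.2 ≤ 17
instance (aal_to_yeo17_mapping : List (Int × Int)) : Decidable (Pre_create_functional_groups aal_to_yeo17_mapping) := by unfold Pre_create_functional_groups; infer_instance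

def pvWitness_create_functional_groups : (List (Int × Int)) := [(1, 0), (2, 17), (3, 5), (4, -16)]

def Spec_create_functional_groups (aal_to_yeo17_mapping : List (Int × Int)) (out : List (String × List Int)) : Prop := out = create_functional_groups_alt aal_to_yeo17_mapping
instance (aal_to_yeo17_mapping : List (Int × Int)) (out : List (String × List Int)) : Decidable (Spec_create_functional_groups aal_to_yeo17_mapping out) := by unfold Spec_create_functional_groups; infer_instance

-- ===== CLAIM (what is proved, stated in full; the proofs are below) =====
def Claim_equal_create_functional_groups : Prop := ∀ (aal_to_yeo17_mapping : List (Int × Int)), Dom_create_functional_groups aal_to_yeo17_mapping → Pre_create_functional_groups aal_to_yeo17_mapping → Spec_create_functional_groups aal_to_yeo17_mapping (create_functional_groups aal_to_yeo17_mapping)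

-- ===== LEMMAS AND PROOFS =====

-- the 18 bucket keys, in output order
def allNames18 : List String := yeoNames17 ++ ["other"]

-- which bucket an item (idx, label) belongs to
def bucketCond (n : String) (p : Int × Int) : Bool :=
  if n = "other" then p.2 == 0
  else p.2 != 0 && (PySem.List.pyGet? yeoNames17 (p.2 - 1) == some n)

theorem allNames18_nodup : allNames18.Nodup := by decide

theorem other_not_mem : "other" ∉ yeoNames17 := by decide

-- dictAppendAt on a keyed map with nodup keys is the pointwise update
theorem dictAppendAt_map (names : List String) (f : String → List Int) (k : String) (v : Int)
    (hnd : names.Nodup) :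
    dictAppendAt (names.map (fun n => (n, f n))) k v
      = names.map (fun n => (n, if n = k then f n ++ [v] else f n)) := by
  induction names with
  | nil => rfl
  | cons a rest ih =>
    rcases List.nodup_cons.mp hnd with ⟨ha, hrest⟩
    by_cases hak : a = k
    · subst hak
      simp only [List.map_cons, dictAppendAt, if_true]
      congr 1
      refine List.map_congr_left (fun n hn => ?_)
      have hna : n ≠ a := fun h => ha (h ▸ hn)
      simp [hna]
    · simp only [List.map_cons, dictAppendAt, if_neg hak, ih hrest]

-- main loop invariant: folding A's step over m extends each bucket with m's matching indices
theorem foldl_invariant (m : List (Int × Int)) (f : String → List Int)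
    (hm : ∀ p ∈ m, -16 ≤ p.2 ∧ p.2 ≤ 17) :
    m.foldl stepA (allNames18.map (fun n => (n, f n)))
    = allNames18.map (fun n => (n, f n ++ (m.filter (bucketCond n)).map (·.1))) := by
  induction m generalizing f with
  | nil => simp
  | cons p m ih =>
    have hp := hm p (List.mem_cons_self ..)
    have hm' : ∀ q ∈ m, -16 ≤ q.2 ∧ q.2 ≤ 17 := fun q hq => hm q (List.mem_cons_of_mem _ hq)
    simp only [List.foldl_cons]
    by_cases h0 : p.2 = 0
    · rw [show stepA (allNames18.map (fun n => (n, f n))) p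
            = dictAppendAt (allNames18.map (fun n => (n, f n))) "other" p.1 from by
          simp [stepA, h0]]
      rw [dictAppendAt_map _ _ _ _ allNames18_nodup, ih _ hm']
      refine List.map_congr_left (fun n _ => ?_)
      have hc : bucketCond n p = decide (n = "other") := by
        by_cases hn : n = "other" <;> simp [bucketCond, hn, h0]
      by_cases hn : n = "other"
      · simp [hn, bucketCond, h0]
      · simp [hc, hn]
    · have hin : PySem.Raise.InRange yeoNames17.length (p.2 - 1) := by
        simp only [PySem.Raise.InRange]
        have : yeoNames17.length = 17 := by decide
        omega
      have hsome : (PySem.List.pyGet? yeoNames17 (p.2 - 1)).isSome := by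
        rw [Option.isSome_iff_ne_none]
        intro hnone
        rw [PySem.List.pyGet?_eq_none_iff] at hnone
        exact hnone hin
      obtain ⟨name, hname⟩ := Option.isSome_iff_exists.mp hsome
      have hmem : name ∈ yeoNames17 := PySem.List.mem_of_pyGet?_eq_some yeoNames17 hname
      have hno : name ≠ "other" := fun h => other_not_mem (h ▸ hmem)
      rw [show stepA (allNames18.map (fun n => (n, f n))) p
            = dictAppendAt (allNames18.map (fun n => (n, f n))) name p.1 from by
          simp [stepA, h0, hname]]
      rw [dictAppendAt_map _ _ _ _ allNames18_nodup, ih _ hm']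
      refine List.map_congr_left (fun n _ => ?_)
      have hc : bucketCond n p = decide (n = name) := by
        by_cases hn : n = "other"
        · subst hn
          simp [bucketCond, h0, Ne.symm hno]
        · have h0' : (p.2 != 0) = true := by simpa using h0
          simp [bucketCond, hn, hname, h0', eq_comm, Bool.beq_eq_decide_eq]
      by_cases hn : n = name
      · simp [hn, bucketCond, hno, h0, hname]
      · simp [hc, hn]

-- B's output in the allNames18/bucketCond form
theorem alt_eq_buckets (m : List (Int × Int)) :
    create_functional_groups_alt m
      = allNames18.map (fun n => (n, (m.filter (bucketCond n)).map (·.1))) := by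
  have h1 : yeoNames17.map (fun name => (name, (m.filter
        (fun p => p.2 != 0 && (PySem.List.pyGet? yeoNames17 (p.2 - 1) == some name))).map (·.1)))
      = yeoNames17.map (fun n => (n, (m.filter (bucketCond n)).map (·.1))) := by
    refine List.map_congr_left (fun n hn => ?_)
    have hno : n ≠ "other" := fun h => other_not_mem (h ▸ hn)
    have hpred : ∀ p : Int × Int,
        (p.2 != 0 && (PySem.List.pyGet? yeoNames17 (p.2 - 1) == some n)) = bucketCond n p :=
      fun p => by simp [bucketCond, hno]
    rw [List.filter_congr (fun p _ => hpred p)]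
  have h2 : m.filter (fun p : Int × Int => p.2 == 0) = m.filter (bucketCond "other") :=
    List.filter_congr (fun p _ => by simp [bucketCond])
  simp only [create_functional_groups_alt, allNames18, List.map_append, List.map_cons,
    List.map_nil, h1, h2]

-- ===== VERDICT (by name: the statement is the Claim_ definition above) =====
theorem create_functional_groups_spec : Claim_equal_create_functional_groups := by
  intro m _ hpre
  show create_functional_groups m = create_functional_groups_alt m
  have hinit : (yeoNames17.map (fun n => (n, ([] : List Int)))) ++ [("other", ([] : List Int))]
      = allNames18.map (fun n => (n, ([] : List Int))) := by
    simp [allNames18]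
  simp only [create_functional_groups, hinit, foldl_invariant m (fun _ => []) hpre,
    List.nil_append, alt_eq_buckets]
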